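-- pv_equiv track=rewrite | github.com/nigelzor/advent-of-code | 2023/day12.py | possible_placements
-- ===== SOURCE A (Python) =====
-- def possible_placements(n: int, pattern: str):
--     """
--     >>> list(possible_placements(1, "?"))
--     [0]
--     >>> list(possible_placements(1, '??'))
--     [0, 1]
--     >>> list(possible_placements(2, '???'))
--     [0, 1]
--     >>> list(possible_placements(1, '???'))
--     [0, 1, 2]
--     >>> list(possible_placements(1, '????'))
--     [0, 1, 2, 3]
--     >>> list(possible_placements(1, '?#?'))
--     [1]
--     >>> list(possible_placements(2, '?#?'))
--     [0, 1]
--     >>> list(possible_placements(1, '?#??'))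
--     [1, 3]
--     >>> list(possible_placements(2, '?#??'))
--     [0, 1]
--     >>> list(possible_placements(2, "?"))
--     []
--     """
--     last = len(pattern) - n
--     start = 0
--     while start <= last:
--         if start != 0 and pattern[start - 1] == '#':
--             start += 1
--             continue
--         if start != last and pattern[start + n] == '#':
--             start += 1
--             continue
--         last_dot = pattern.rfind('.', start, start + n)
--         if last_dot >= 0:
--             start = last_dot + 1
--             continue
--         yield start
--         start += 1
-- ===== SOURCE B (Python) =====
-- def possible_placements(n: int, pattern: str):
--     # One pass to build prefix counts of '.', then one linear scan with O(1)
--     # window checks (no rfind re-scans of the window).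
--     L = len(pattern)
--     last = L - n
--     dots = [0] * (L + 1)
--     for i, c in enumerate(pattern):
--         dots[i + 1] = dots[i] + (c == '.')
--     for s in range(last + 1):
--         if s > 0 and pattern[s - 1] == '#':
--             continue
--         if s < last and pattern[s + n] == '#':
--             continue
--         if dots[s + n] - dots[s]:
--             continue
--         yield s
-- ===== Notes on version B (the rewrite author's own statement) =====
-- stated objective: faster
-- what changed: Replaces the jumping while-loop that re-scans each candidate window with str.rfind by a prefix-count array of '.' built in one pass, so every window check is O(1) in a single linear scan.
import Mathlib
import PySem

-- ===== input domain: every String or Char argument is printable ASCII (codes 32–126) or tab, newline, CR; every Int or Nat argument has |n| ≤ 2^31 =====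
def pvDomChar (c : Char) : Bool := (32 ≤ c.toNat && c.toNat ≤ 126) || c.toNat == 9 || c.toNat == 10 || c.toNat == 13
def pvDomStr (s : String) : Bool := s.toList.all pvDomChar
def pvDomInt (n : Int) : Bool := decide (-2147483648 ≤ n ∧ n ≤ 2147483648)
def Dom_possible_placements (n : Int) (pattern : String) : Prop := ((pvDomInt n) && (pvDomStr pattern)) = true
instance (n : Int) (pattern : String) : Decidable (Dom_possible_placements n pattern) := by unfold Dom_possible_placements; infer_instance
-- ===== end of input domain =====

-- B replaces A's per-position str.rfind window scans by prefix counts of '.' built in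
-- one pass, giving a single linear scan with O(1) window checks (objective: faster).

-- ===== PORT A =====
-- The while loop; start strictly increases by at least 1 per iteration (the rfind jump
-- goes to last_dot+1 ≥ start+1), so (last+1).toNat iterations suffice: fuel is only a
-- totality guard, never reached on admitted inputs.
def pvALoop (chars : List Char) (n last : Int) : Nat → Int → List Int → List Int
  | 0, _, acc => acc
  | Nat.succ fuel, start, acc =>
    if start ≤ last then
      if start ≠ 0 ∧ PySem.List.pyGet? chars (start - 1) = some '#' then
        pvALoop chars n last fuel (start + 1) acc
      else if start ≠ last ∧ PySem.List.pyGet? chars (start + n) = some '#' then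
        pvALoop chars n last fuel (start + 1) acc
      else
        -- last_dot = pattern.rfind('.', start, start + n)
        if 0 ≤ PySem.Chars.rfindFrom chars ['.'] start (some (start + n)) then
          pvALoop chars n last fuel (PySem.Chars.rfindFrom chars ['.'] start (some (start + n)) + 1) acc
        else
          pvALoop chars n last fuel (start + 1) (acc ++ [start])
    else acc

def possible_placements (n : Int) (pattern : String) : List Int :=
  let chars := pattern.toList
  let last : Int := (chars.length : Int) - n
  pvALoop chars n last (last + 1).toNat 0 []

-- ===== PORT B =====
-- dots[i] = number of '.' among the first i characters, built by a running sum.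
def pvBuildDots : List Char → Int → List Int
  | [], cur => [cur]
  | c :: t, cur => cur :: pvBuildDots t (cur + (if c = '.' then 1 else 0))

-- pyGetD _ _ 0: under Pre_ (0 ≤ n) every index s, s+n lies in [0, len(dots)), where
-- Python's dots[...] returns normally; the default is never used there.
def possible_placements_alt (n : Int) (pattern : String) : List Int :=
  let chars := pattern.toList
  let L : Int := chars.length
  let last : Int := L - n
  let dots := pvBuildDots chars 0
  (PySem.List.pyRange 0 (last + 1) 1).foldl (fun acc s =>
    if 0 < s ∧ PySem.List.pyGet? chars (s - 1) = some '#' then acc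
    else if s < last ∧ PySem.List.pyGet? chars (s + n) = some '#' then acc
    else if PySem.List.pyGetD dots (s + n) 0 - PySem.List.pyGetD dots s 0 ≠ 0 then acc
    else acc ++ [s]) []

-- ===== PRECONDITION & SPEC =====
-- Pre_ excludes n < 0, where both A and B raise IndexError (the scan runs past the end
-- of the string); A returns normally on every input with 0 ≤ n.
def Pre_possible_placements (n : Int) (pattern : String) : Prop := 0 ≤ n
instance (n : Int) (pattern : String) : Decidable (Pre_possible_placements n pattern) := by
  unfold Pre_possible_placements; infer_instance

def pvWitness_possible_placements : Int × String := (1, "?#??")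

def Spec_possible_placements (n : Int) (pattern : String) (out : List Int) : Prop :=
  out = possible_placements_alt n pattern
instance (n : Int) (pattern : String) (out : List Int) : Decidable (Spec_possible_placements n pattern out) := by
  unfold Spec_possible_placements; infer_instance

-- ===== CLAIM (what is proved, stated in full; the proofs are below) =====
def Claim_equal_possible_placements : Prop := ∀ (n : Int) (pattern : String),
  Dom_possible_placements n pattern → Pre_possible_placements n pattern →
  Spec_possible_placements n pattern (possible_placements n pattern)

-- ===== LEMMAS AND PROOFS =====

-- the placement test both programs implement, as a Bool predicate on the start position
def pvOk (chars : List Char) (n last s : Int) : Bool :=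
  !(decide (s ≠ 0) && decide (PySem.List.pyGet? chars (s - 1) = some '#'))
  && !(decide (s ≠ last) && decide (PySem.List.pyGet? chars (s + n) = some '#'))
  && !((PySem.List.slice chars (some s) (some (s + n))).contains '.')

theorem pvPrefixOf_single (t : List Char) (ch : Char) :
    [ch].isPrefixOf t = true ↔ t[0]? = some ch := by
  cases t with
  | nil => simp [List.isPrefixOf]
  | cons b t =>
    simp only [List.isPrefixOf, List.getElem?_cons_zero, Option.some.injEq]
    constructor
    · intro h
      have := (Bool.and_eq_true _ _).mp h
      exact (beq_iff_eq.mp this.1).symm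
    · intro h
      subst h
      simp

theorem pvGo_cases (s : List Char) (ch : Char) (j : Nat) :
    (PySem.Chars.rfind.go s [ch] j = -1 ∧ ∀ i : Nat, i ≤ j → s[i]? ≠ some ch)
    ∨ (∃ i : Nat, i ≤ j ∧ PySem.Chars.rfind.go s [ch] j = (i : Int) ∧ s[i]? = some ch) := by
  induction j with
  | zero =>
    rw [PySem.Chars.rfind.go]
    by_cases h : [ch].isPrefixOf s = true
    · exact Or.inr ⟨0, le_rfl, by simp [h], (pvPrefixOf_single s ch).mp h⟩
    · refine Or.inl ⟨by simp [h], ?_⟩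
      intro i hi
      interval_cases i
      exact fun hc => h ((pvPrefixOf_single s ch).mpr hc)
  | succ j ih =>
    rw [PySem.Chars.rfind.go]
    by_cases h : [ch].isPrefixOf (s.drop (j + 1)) = true
    · refine Or.inr ⟨j + 1, le_rfl, by simp [h], ?_⟩
      have := (pvPrefixOf_single _ ch).mp h
      rwa [List.getElem?_drop, Nat.add_zero] at this
    · rcases ih with ⟨h1, h2⟩ | ⟨i, hi, he, hv⟩
      · refine Or.inl ⟨by simp [h, h1], ?_⟩
        intro i hi
        rcases Nat.lt_or_ge i (j + 1) with hlt | hge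
        · exact h2 i (by omega)
        · have : i = j + 1 := by omega
          subst this
          intro hc
          exact h ((pvPrefixOf_single _ ch).mpr (by rwa [List.getElem?_drop, Nat.add_zero]))
      · exact Or.inr ⟨i, by omega, by simp [h, he], hv⟩

-- rfindFrom on a well-formed window: -1 with no '.' in the window, or an absolute
-- index of a '.' inside it
theorem pvRfindFrom_cases (chars : List Char) (start n : Int) (h0 : 0 ≤ start) (hn : 0 ≤ n)
    (hub : start + n ≤ (chars.length : Int)) :
    (PySem.Chars.rfindFrom chars ['.'] start (some (start + n)) = -1 ∧
      '.' ∉ (chars.drop start.toNat).take n.toNat)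
    ∨ (start ≤ PySem.Chars.rfindFrom chars ['.'] start (some (start + n)) ∧
       PySem.Chars.rfindFrom chars ['.'] start (some (start + n)) < start + n ∧
       chars[(PySem.Chars.rfindFrom chars ['.'] start (some (start + n))).toNat]? = some '.') := by
  have hw : (chars.take (start + n).toNat).drop start.toNat
      = (chars.drop start.toNat).take n.toNat := by
    rw [List.drop_take]
    congr 1
    omega
  have hsimp : PySem.Chars.rfindFrom chars ['.'] start (some (start + n))
      = (if PySem.Chars.rfind ((chars.take (start + n).toNat).drop start.toNat) ['.'] = -1
         then -1
         else start + PySem.Chars.rfind ((chars.take (start + n).toNat).drop start.toNat) ['.']) := by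
    rw [PySem.Chars.rfindFrom]
    have e1 : ¬ ((chars.length : Int) < start + n) := by omega
    have e2 : ¬ (start + n < 0) := by omega
    have e3 : ¬ (start < 0) := by omega
    have e4 : ¬ (start + n < start) := by omega
    simp only [e1, e2, e3, e4, if_false]
  set w := (chars.take (start + n).toNat).drop start.toNat with hwdef
  have hwlen : w.length ≤ n.toNat := by
    rw [hw]
    simp
  rcases pvGo_cases w '.' w.length with ⟨h1, _h2⟩ | ⟨i, _hi, he, hv⟩
  · left
    constructor
    · rw [hsimp]
      simp [PySem.Chars.rfind, h1]
    · rw [← hw]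
      intro hmem
      obtain ⟨k, hk, hkv⟩ := List.getElem_of_mem hmem
      exact _h2 k (by omega) (by simp [List.getElem?_eq_getElem hk, hkv])
  · right
    have hilt : i < w.length := by
      by_contra hc
      have : w[i]? = none := List.getElem?_eq_none (by omega)
      rw [this] at hv
      simp at hv
    have hval : PySem.Chars.rfind w ['.'] = (i : Int) := by
      rw [PySem.Chars.rfind]
      exact he
    have hne : PySem.Chars.rfind w ['.'] ≠ -1 := by
      rw [hval]
      omega
    have habs : chars[(start.toNat + i)]? = some '.' := by
      have := hv
      rw [hwdef, List.getElem?_drop] at this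
      rwa [List.getElem?_take_of_lt (by omega)] at this
    rw [hsimp, if_neg hne, hval]
    refine ⟨by omega, by omega, ?_⟩
    have : (start + (i : Int)).toNat = start.toNat + i := by omega
    rw [this]
    exact habs

-- a '.' at absolute index d inside the window of s kills the placement at s
theorem pvOk_false_of_dot (chars : List Char) (n last s d : Int) (hn : 0 ≤ n) (hs : 0 ≤ s)
    (hsd : s ≤ d) (hdw : d < s + n) (hdot : chars[d.toNat]? = some '.') :
    pvOk chars n last s = false := by
  have hdlen : d.toNat < chars.length := by
    by_contra hc
    rw [List.getElem?_eq_none (by omega)] at hdot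
    simp at hdot
  have hmem : '.' ∈ PySem.List.slice chars (some s) (some (s + n)) := by
    rw [PySem.List.slice_toNat chars hs (by omega)]
    have hidx : (List.take ((s + n).toNat - s.toNat) (List.drop s.toNat chars))[d.toNat - s.toNat]?
        = some '.' := by
      rw [List.getElem?_take_of_lt (by omega), List.getElem?_drop]
      have : s.toNat + (d.toNat - s.toNat) = d.toNat := by omega
      rw [this]
      exact hdot
    exact List.mem_of_getElem? hidx
  unfold pvOk
  simp
  intro _ _
  exact hmem

theorem pvALoop_out (chars : List Char) (n last : Int) (fuel : Nat) (start : Int)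
    (acc : List Int) (h : ¬ start ≤ last) :
    pvALoop chars n last fuel start acc = acc := by
  cases fuel <;> simp [pvALoop, h]

theorem pvALoop_eq (chars : List Char) (n last : Int) (hlast : last = (chars.length : Int) - n)
    (hn : 0 ≤ n) :
    ∀ (fuel : Nat) (start : Int) (acc : List Int), 0 ≤ start →
      (last + 1 - start).toNat ≤ fuel →
      pvALoop chars n last fuel start acc
        = acc ++ (PySem.List.pyRange start (last + 1) 1).filter (pvOk chars n last) := by
  intro fuel
  induction fuel with
  | zero =>
    intro start acc h0 hfuel
    rw [PySem.List.pyRange_one_eq_nil (by omega)]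
    simp [pvALoop]
  | succ fuel ih =>
    intro start acc h0 hfuel
    by_cases hle : start ≤ last
    · by_cases c1 : start ≠ 0 ∧ PySem.List.pyGet? chars (start - 1) = some '#'
      · have hok : pvOk chars n last start = false := by
          unfold pvOk
          simp [c1.1, c1.2]
        rw [PySem.List.pyRange_one_cons (show start < last + 1 by omega)]
        simp only [pvALoop, if_pos hle, if_pos c1]
        rw [ih (start + 1) acc (by omega) (by omega)]
        simp [hok]
      · by_cases c2 : start ≠ last ∧ PySem.List.pyGet? chars (start + n) = some '#'
        · have hok : pvOk chars n last start = false := by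
            unfold pvOk
            simp [c2.1, c2.2]
          rw [PySem.List.pyRange_one_cons (show start < last + 1 by omega)]
          simp only [pvALoop, if_pos hle, if_neg c1, if_pos c2]
          rw [ih (start + 1) acc (by omega) (by omega)]
          simp [hok]
        · rcases pvRfindFrom_cases chars start n h0 hn (by omega) with ⟨hm1, hnd⟩ | ⟨hd1, hd2, hdot⟩
          · -- no '.' in the window: yield start
            have hd : ¬ (0 ≤ PySem.Chars.rfindFrom chars ['.'] start (some (start + n))) := by
              rw [hm1]
              omega
            have hok : pvOk chars n last start = true := by
              unfold pvOk
              have hsl : PySem.List.slice chars (some start) (some (start + n))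
                  = (chars.drop start.toNat).take n.toNat := by
                rw [PySem.List.slice_toNat chars h0 (by omega)]
                congr 1
                omega
              have hA1 : (decide (start ≠ 0) &&
                  decide (PySem.List.pyGet? chars (start - 1) = some '#')) = false := by
                simpa [Decidable.not_and_iff_not_or_not] using c1
              have hA2 : (decide (start ≠ last) &&
                  decide (PySem.List.pyGet? chars (start + n) = some '#')) = false := by
                simpa [Decidable.not_and_iff_not_or_not] using c2
              rw [hsl, hA1, hA2]
              simp [hnd]
            rw [PySem.List.pyRange_one_cons (show start < last + 1 by omega)]
            simp only [pvALoop, if_pos hle, if_neg c1, if_neg c2, if_neg hd]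
            rw [ih (start + 1) (acc ++ [start]) (by omega) (by omega)]
            simp [hok]
          · -- a '.' at index d: all starts in [start, d] are impossible, jump to d+1
            set d := PySem.Chars.rfindFrom chars ['.'] start (some (start + n)) with hddef
            have hd : 0 ≤ d := by omega
            by_cases hdl : d ≤ last
            · rw [PySem.List.pyRange_one_append start (d + 1) (last + 1) (by omega) (by omega)]
              rw [List.filter_append]
              have hnil : (PySem.List.pyRange start (d + 1) 1).filter (pvOk chars n last) = [] := by
                rw [List.filter_eq_nil_iff]
                intro s hsmem
                obtain ⟨hs1, hs2⟩ := PySem.List.mem_pyRange_one.mp hsmem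
                simp [pvOk_false_of_dot chars n last s d hn (by omega) (by omega) (by omega) hdot]
              simp only [pvALoop, if_pos hle, if_neg c1, if_neg c2, if_pos hd, ← hddef]
              rw [ih (d + 1) acc (by omega) (by omega)]
              rw [hnil]
              simp
            · -- the jump leaves the loop
              have hnil : (PySem.List.pyRange start (last + 1) 1).filter
                  (pvOk chars n last) = [] := by
                rw [List.filter_eq_nil_iff]
                intro s hsmem
                obtain ⟨hs1, hs2⟩ := PySem.List.mem_pyRange_one.mp hsmem
                simp [pvOk_false_of_dot chars n last s d hn (by omega) (by omega) (by omega) hdot]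
              rw [hnil]
              simp only [pvALoop, if_pos hle, if_neg c1, if_neg c2, if_pos hd, ← hddef]
              rw [pvALoop_out chars n last fuel (d + 1) acc (by omega)]
              simp
    · rw [pvALoop_out chars n last (fuel + 1) start acc hle,
        PySem.List.pyRange_one_eq_nil (by omega)]
      simp

theorem pvBuildDots_getElem? (cs : List Char) (cur : Int) (k : Nat) (hk : k ≤ cs.length) :
    (pvBuildDots cs cur)[k]? = some (cur + ((cs.take k).count '.' : Int)) := by
  induction cs generalizing cur k with
  | nil =>
    cases k with
    | zero => simp [pvBuildDots]
    | succ k => simp at hk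
  | cons c t ih =>
    cases k with
    | zero => simp [pvBuildDots]
    | succ k =>
      simp only [pvBuildDots, List.getElem?_cons_succ, List.take_succ_cons]
      rw [ih _ k (by simpa using hk)]
      by_cases hc : c = '.'
      · simp [hc]
        ring
      · simp [hc]

-- the prefix-count difference is the number of '.' in the window
theorem pvDots_diff (chars : List Char) (n s : Int) (hn : 0 ≤ n) (hs : 0 ≤ s)
    (hub : s + n ≤ (chars.length : Int)) :
    PySem.List.pyGetD (pvBuildDots chars 0) (s + n) 0 - PySem.List.pyGetD (pvBuildDots chars 0) s 0
      = (((chars.drop s.toNat).take n.toNat).count '.' : Int) := by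
  have h1 : (s + n).toNat = s.toNat + n.toNat := by omega
  have h2 : (s + n).toNat ≤ chars.length := by omega
  have h3 : s.toNat ≤ chars.length := by omega
  rw [PySem.List.pyGetD_of_nonneg _ _ (by omega), PySem.List.pyGetD_of_nonneg _ _ hs]
  rw [List.getD_eq_getElem?_getD, List.getD_eq_getElem?_getD]
  rw [pvBuildDots_getElem? _ _ _ h2, pvBuildDots_getElem? _ _ _ h3]
  rw [h1, List.take_add, List.count_append]
  simp only [Option.getD_some]
  push_cast
  ring

theorem pvBfold_eq (chars : List Char) (n : Int) (hn : 0 ≤ n) :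
    ((PySem.List.pyRange 0 ((chars.length : Int) - n + 1) 1).foldl (fun acc s =>
      if 0 < s ∧ PySem.List.pyGet? chars (s - 1) = some '#' then acc
      else if s < (chars.length : Int) - n ∧ PySem.List.pyGet? chars (s + n) = some '#' then acc
      else if PySem.List.pyGetD (pvBuildDots chars 0) (s + n) 0
            - PySem.List.pyGetD (pvBuildDots chars 0) s 0 ≠ 0 then acc
      else acc ++ [s]) [])
      = (PySem.List.pyRange 0 ((chars.length : Int) - n + 1) 1).filter
          (pvOk chars n ((chars.length : Int) - n)) := by
  rw [PySem.List.foldl_congr_mem' _ _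
    (fun acc s => if pvOk chars n ((chars.length : Int) - n) s = true
      then acc ++ [s] else acc) _ ?_]
  · exact PySem.List.foldl_append_if_eq_filter _ _ _
  · intro s hs acc
    beta_reduce
    obtain ⟨hs0, hs1⟩ := PySem.List.mem_pyRange_one.mp hs
    have hdiff := pvDots_diff chars n s hn hs0 (by omega)
    have hslice : PySem.List.slice chars (some s) (some (s + n))
        = List.take n.toNat (List.drop s.toNat chars) := by
      rw [PySem.List.slice_toNat chars hs0 (by omega)]
      congr 1
      omega
    unfold pvOk
    rw [hslice, hdiff]
    by_cases c1 : s ≠ 0 ∧ PySem.List.pyGet? chars (s - 1) = some '#'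
    · have h1 : 0 < s := by omega
      simp [c1.1, c1.2, h1]
    · by_cases c2 : s ≠ ((chars.length : Int) - n) ∧
          PySem.List.pyGet? chars (s + n) = some '#'
      · have h1 : ¬ (0 < s ∧ PySem.List.pyGet? chars (s - 1) = some '#') := by
          intro h
          exact c1 ⟨by omega, h.2⟩
        have h2 : s < (chars.length : Int) - n := by
          rcases c2 with ⟨hne, _⟩
          omega
        rw [if_neg h1, if_pos (And.intro h2 c2.2)]
        have hA2 : (decide (s ≠ ((chars.length : Int) - n)) &&
            decide (PySem.List.pyGet? chars (s + n) = some '#')) = true := by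
          simp [c2.1, c2.2]
        unfold pvOk at *
        simp [c2.1, c2.2]
      · have h1 : ¬ (0 < s ∧ PySem.List.pyGet? chars (s - 1) = some '#') := by
          intro h
          exact c1 ⟨by omega, h.2⟩
        have h2 : ¬ (s < (chars.length : Int) - n ∧
            PySem.List.pyGet? chars (s + n) = some '#') := by
          intro h
          exact c2 ⟨by omega, h.2⟩
        have hA1 : (decide (s ≠ 0) && decide (PySem.List.pyGet? chars (s - 1) = some '#')) = false := by
          simpa [Decidable.not_and_iff_not_or_not] using c1
        have hA2 : (decide (s ≠ ((chars.length : Int) - n)) &&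
            decide (PySem.List.pyGet? chars (s + n) = some '#')) = false := by
          simpa [Decidable.not_and_iff_not_or_not] using c2
        rw [if_neg h1, if_neg h2, hA1, hA2]
        by_cases c3 : (((chars.drop s.toNat).take n.toNat).count '.' : Int) ≠ 0
        · have hmem : '.' ∈ (chars.drop s.toNat).take n.toNat := by
            by_contra hc
            exact c3 (by exact_mod_cast congrArg Nat.cast (List.count_eq_zero.mpr hc))
          have hcnt : List.count '.' (List.take n.toNat (List.drop s.toNat chars)) ≠ 0 := by
            exact_mod_cast c3
          simp [hcnt, hmem]
        · have hnm : '.' ∉ (chars.drop s.toNat).take n.toNat := by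
            rw [← List.count_eq_zero]
            omega
          have hcnt : List.count '.' (List.take n.toNat (List.drop s.toNat chars)) = 0 := by
            exact_mod_cast not_not.mp c3
          simp [hcnt, hnm]

-- ===== VERDICT (by name: the statement is the Claim_ definition above) =====
theorem possible_placements_spec : Claim_equal_possible_placements := by
  intro n pattern _ hpre
  unfold Spec_possible_placements possible_placements possible_placements_alt
  rw [pvBfold_eq pattern.toList n hpre]
  exact pvALoop_eq pattern.toList n _ rfl hpre _ 0 [] le_rfl (by omega)
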